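-- pv_equiv track=rewrite | github.com/djj45/jianyingsrt | srt.py | srttime
-- ===== SOURCE A (Python) =====
-- def srttime(t):
--     ms = str(0)
--     s = str(0)
--     m = str(0)
--     h = str(0)
--
--     if t < 1000:
--         ms = str(t)
--     elif t >= 1000 and t < 60000:
--         s = str(t // 1000)
--         ms = str(t % 1000)
--     elif t >= 60000 and t < 3600000:
--         m = str(t // 60000)
--         s = str(t % 60000 // 1000)
--         ms = str(t % 60000 % 1000)
--     elif t >= 3600000:
--         h = str(t // 3600000)
--         m = str(t % 3600000 // 60000)
--         s = str(t % 3600000 % 60000 // 1000)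
--         ms = str(t % 3600000 % 60000 % 1000)
--
--     if len(s) == 1:
--         s = "0" + s
--     if len(m) == 1:
--         m = "0" + m
--     if len(h) == 1:
--         h = "0" + h
--     while len(ms) < 3:
--         ms = "0" + ms
--
--     return h + ":" + m + ":" + s + "," + ms
-- ===== SOURCE B (Python) =====
-- def srttime(t):
--     out = ""
--     r = t
--     for unit, width, sep in ((1000, 3, ","), (60, 2, ":"), (60, 2, ":")):
--         r, d = divmod(r, unit)
--         out = sep + str(d).rjust(width, "0") + out
--     return str(r).rjust(2, "0") + out
-- ===== Notes on version B (the rewrite author's own statement) =====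
-- stated objective: simpler
-- what changed: Replaced A's four-way magnitude-band if/elif, which recomputes h/m/s/ms with nested // and % against absolute millisecond divisors and then pads in a second pass, by a single table-driven loop over the relative unit sizes that threads one running quotient, pads each field as it is produced, and accumulates the output string back-to-front.
-- outside the precondition, e.g. on srttime(-1500): A returns '00:00:00,-1500', B returns '-1:59:58,500'
import Mathlib
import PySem

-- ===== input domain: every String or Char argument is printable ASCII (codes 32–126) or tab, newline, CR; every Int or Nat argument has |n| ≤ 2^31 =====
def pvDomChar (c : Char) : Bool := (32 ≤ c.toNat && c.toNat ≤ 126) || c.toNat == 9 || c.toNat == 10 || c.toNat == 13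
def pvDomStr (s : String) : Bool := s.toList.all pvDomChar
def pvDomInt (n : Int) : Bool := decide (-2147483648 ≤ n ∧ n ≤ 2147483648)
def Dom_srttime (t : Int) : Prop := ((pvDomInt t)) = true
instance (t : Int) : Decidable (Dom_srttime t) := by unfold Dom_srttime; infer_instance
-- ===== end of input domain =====

-- B replaces A's four-way magnitude-band if/elif (with absolute divisors 3600000/60000/1000
-- recomputed by nested // and %) with one table-driven loop over the relative unit sizes (ms-per-second, then seconds- and minutes-per-hour-digit radices)
-- that threads a single running quotient and builds the padded string back-to-front.

-- ===== PORT A =====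
-- the 'while len(ms) < 3: ms = "0" + ms' loop of A, transcribed as recursion
def srtMsWhile (ms : List Char) : List Char :=
  if ms.length < 3 then srtMsWhile ('0' :: ms) else ms
termination_by 3 - ms.length

def srttime (t : Int) : String :=
  let ms := PySem.Int.toChars 0
  let s := PySem.Int.toChars 0
  let m := PySem.Int.toChars 0
  let h := PySem.Int.toChars 0
  let (ms, s, m, h) :=
    if t < 1000 then
      (PySem.Int.toChars t, s, m, h)
    else if 1000 ≤ t ∧ t < 60000 then
      (PySem.Int.toChars (PySem.Int.mod t 1000),
       PySem.Int.toChars (PySem.Int.floordiv t 1000), m, h)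
    else if 60000 ≤ t ∧ t < 3600000 then
      (PySem.Int.toChars (PySem.Int.mod (PySem.Int.mod t 60000) 1000),
       PySem.Int.toChars (PySem.Int.floordiv (PySem.Int.mod t 60000) 1000),
       PySem.Int.toChars (PySem.Int.floordiv t 60000), h)
    else if 3600000 ≤ t then
      (PySem.Int.toChars (PySem.Int.mod (PySem.Int.mod (PySem.Int.mod t 3600000) 60000) 1000),
       PySem.Int.toChars (PySem.Int.floordiv (PySem.Int.mod (PySem.Int.mod t 3600000) 60000) 1000),
       PySem.Int.toChars (PySem.Int.floordiv (PySem.Int.mod t 3600000) 60000),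
       PySem.Int.toChars (PySem.Int.floordiv t 3600000))
    else (ms, s, m, h)
  let s := if s.length == 1 then '0' :: s else s
  let m := if m.length == 1 then '0' :: m else m
  let h := if h.length == 1 then '0' :: h else h
  let ms := srtMsWhile ms
  String.ofList (h ++ ':' :: m ++ ':' :: s ++ ',' :: ms)

-- ===== PORT B =====
-- str(d).rjust(w, "0"): exact for the nonnegative values produced inside Pre_
def zeroPad (w : Nat) (cs : List Char) : List Char :=
  List.replicate (w - cs.length) '0' ++ cs

-- one iteration of B's 'for unit, width, sep in …' loop: r, d = divmod(r, unit); prepend field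
def srtStep (st : Int × List Char) (spec : Int × Nat × Char) : Int × List Char :=
  (PySem.Int.floordiv st.1 spec.1,
   spec.2.2 :: zeroPad spec.2.1 (PySem.Int.toChars (PySem.Int.mod st.1 spec.1)) ++ st.2)

def srttime_alt (t : Int) : String :=
  let res := [((1000 : Int), (3 : Nat), ','), (60, 2, ':'), (60, 2, ':')].foldl srtStep (t, [])
  String.ofList (zeroPad 2 (PySem.Int.toChars res.1) ++ res.2)

-- ===== PRECONDITION & SPEC =====
-- Pre_ excludes negative t, outside the natural SRT-time domain: there A's first band emits
-- str(t) padded as if it were a digit string (e.g. '00:00:00,-1500'), while B's divmod loop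
-- yields a different, equally unspecified rendering — neither value is the one anyone would specify.
def Pre_srttime (t : Int) : Prop := 0 ≤ t
instance (t : Int) : Decidable (Pre_srttime t) := by unfold Pre_srttime; infer_instance
def pvWitness_srttime : Int := 61001

def Spec_srttime (t : Int) (out : String) : Prop := out = srttime_alt t
instance (t : Int) (out : String) : Decidable (Spec_srttime t out) := by unfold Spec_srttime; infer_instance

-- ===== CLAIM (what is proved, stated in full; the proofs are below) =====
def Claim_equal_srttime : Prop := ∀ (t : Int), Dom_srttime t → Pre_srttime t → Spec_srttime t (srttime t)

-- ===== LEMMAS AND PROOFS =====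

theorem toDigits_pos (m : Nat) : 0 < (Nat.toDigits 10 m).length := by
  unfold Nat.toDigits
  simp only [Nat.toDigitsCore]
  split_ifs <;> simp [Nat.toDigitsCore_lens_eq]

theorem toChars_ne_nil (n : Int) : PySem.Int.toChars n ≠ [] := by
  unfold PySem.Int.toChars
  split
  · simp
  · have := toDigits_pos n.toNat
    intro h; rw [h] at this; simp at this

-- A's one-shot 'if len == 1 then prepend "0"' equals padding to width 2 (for nonempty digit strings)
theorem pad2_eq (cs : List Char) (h : cs ≠ []) :
    (if cs.length == 1 then '0' :: cs else cs) = zeroPad 2 cs := by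
  match cs with
  | [] => exact absurd rfl h
  | [a] => simp [zeroPad]
  | a :: b :: rest => simp [zeroPad, List.length]

-- A's while loop equals padding to width 3
theorem srtMsWhile_eq (cs : List Char) : srtMsWhile cs = zeroPad 3 cs := by
  match cs with
  | [] => unfold srtMsWhile srtMsWhile srtMsWhile srtMsWhile; simp [zeroPad]
  | [a] => unfold srtMsWhile srtMsWhile srtMsWhile; simp [zeroPad]
  | [a, b] => unfold srtMsWhile srtMsWhile; simp [zeroPad]
  | a :: b :: c :: rest => unfold srtMsWhile; simp [zeroPad, List.length]

theorem format_eq (msc sc mc hc : List Char) (hs : sc ≠ []) (hm : mc ≠ []) (hh : hc ≠ []) :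
    String.ofList ((if hc.length == 1 then '0' :: hc else hc) ++ ':' ::
               (if mc.length == 1 then '0' :: mc else mc) ++ ':' ::
               (if sc.length == 1 then '0' :: sc else sc) ++ ',' :: srtMsWhile msc)
    = String.ofList (zeroPad 2 hc ++ ':' :: zeroPad 2 mc ++ ':' :: zeroPad 2 sc ++ ',' :: zeroPad 3 msc) := by
  rw [pad2_eq sc hs, pad2_eq mc hm, pad2_eq hc hh, srtMsWhile_eq]

-- B's relative divmod loop, written out and re-associated to A's absolute divisors
theorem alt_eq_abs (t : Int) :
    srttime_alt t =
    String.ofList (zeroPad 2 (PySem.Int.toChars (PySem.Int.floordiv t 3600000)) ++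
      ':' :: zeroPad 2 (PySem.Int.toChars (PySem.Int.floordiv (PySem.Int.mod t 3600000) 60000)) ++
      ':' :: zeroPad 2 (PySem.Int.toChars (PySem.Int.floordiv (PySem.Int.mod (PySem.Int.mod t 3600000) 60000) 1000)) ++
      ',' :: zeroPad 3 (PySem.Int.toChars (PySem.Int.mod (PySem.Int.mod (PySem.Int.mod t 3600000) 60000) 1000))) := by
  have eH : PySem.Int.floordiv (PySem.Int.floordiv (PySem.Int.floordiv t 1000) 60) 60
      = PySem.Int.floordiv t 3600000 := by
    rw [PySem.Int.floordiv_eq_ediv_of_pos (by norm_num), PySem.Int.floordiv_eq_ediv_of_pos (by norm_num),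
        PySem.Int.floordiv_eq_ediv_of_pos (by norm_num), PySem.Int.floordiv_eq_ediv_of_pos (by norm_num)]
    omega
  have eM : PySem.Int.mod (PySem.Int.floordiv (PySem.Int.floordiv t 1000) 60) 60
      = PySem.Int.floordiv (PySem.Int.mod t 3600000) 60000 := by
    rw [PySem.Int.mod_eq_emod_of_pos (by norm_num), PySem.Int.floordiv_eq_ediv_of_pos (by norm_num),
        PySem.Int.floordiv_eq_ediv_of_pos (by norm_num), PySem.Int.floordiv_eq_ediv_of_pos (by norm_num),
        PySem.Int.mod_eq_emod_of_pos (by norm_num)]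
    omega
  have eS : PySem.Int.mod (PySem.Int.floordiv t 1000) 60
      = PySem.Int.floordiv (PySem.Int.mod (PySem.Int.mod t 3600000) 60000) 1000 := by
    rw [PySem.Int.mod_eq_emod_of_pos (by norm_num), PySem.Int.floordiv_eq_ediv_of_pos (by norm_num),
        PySem.Int.floordiv_eq_ediv_of_pos (by norm_num), PySem.Int.mod_eq_emod_of_pos (by norm_num),
        PySem.Int.mod_eq_emod_of_pos (by norm_num)]
    omega
  have eMs : PySem.Int.mod t 1000
      = PySem.Int.mod (PySem.Int.mod (PySem.Int.mod t 3600000) 60000) 1000 := by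
    rw [PySem.Int.mod_eq_emod_of_pos (by norm_num), PySem.Int.mod_eq_emod_of_pos (by norm_num),
        PySem.Int.mod_eq_emod_of_pos (by norm_num), PySem.Int.mod_eq_emod_of_pos (by norm_num)]
    omega
  unfold srttime_alt srtStep
  simp only [List.foldl]
  rw [eH, eM, eS, eMs]
  simp

-- ===== VERDICT (by name: the statement is the Claim_ definition above) =====
theorem srttime_spec : Claim_equal_srttime := by
  intro t _ ht
  have ht' : 0 ≤ t := ht
  unfold Spec_srttime
  rw [alt_eq_abs t]
  unfold srttime
  have ne := toChars_ne_nil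
  by_cases h1 : t < 1000
  · -- band 1: all absolute quotients are 0, all remainders are t
    have e1 : PySem.Int.floordiv t 3600000 = 0 := by
      rw [PySem.Int.floordiv_eq_ediv_of_pos (by norm_num)]; omega
    have e2 : PySem.Int.mod t 3600000 = t := by
      rw [PySem.Int.mod_eq_emod_of_pos (by norm_num)]; omega
    have e3 : PySem.Int.floordiv t 60000 = 0 := by
      rw [PySem.Int.floordiv_eq_ediv_of_pos (by norm_num)]; omega
    have e4 : PySem.Int.mod t 60000 = t := by
      rw [PySem.Int.mod_eq_emod_of_pos (by norm_num)]; omega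
    have e5 : PySem.Int.floordiv t 1000 = 0 := by
      rw [PySem.Int.floordiv_eq_ediv_of_pos (by norm_num)]; omega
    have e6 : PySem.Int.mod t 1000 = t := by
      rw [PySem.Int.mod_eq_emod_of_pos (by norm_num)]; omega
    simp only [if_pos h1, e1, e2, e3, e4, e5, e6]
    exact format_eq _ _ _ _ (ne 0) (ne 0) (ne 0)
  · by_cases h2 : t < 60000
    · -- band 2: h = m = 0, remainders collapse to t
      have e1 : PySem.Int.floordiv t 3600000 = 0 := by
        rw [PySem.Int.floordiv_eq_ediv_of_pos (by norm_num)]; omega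
      have e2 : PySem.Int.mod t 3600000 = t := by
        rw [PySem.Int.mod_eq_emod_of_pos (by norm_num)]; omega
      have e3 : PySem.Int.floordiv t 60000 = 0 := by
        rw [PySem.Int.floordiv_eq_ediv_of_pos (by norm_num)]; omega
      have e4 : PySem.Int.mod t 60000 = t := by
        rw [PySem.Int.mod_eq_emod_of_pos (by norm_num)]; omega
      simp only [if_neg h1, if_pos (show 1000 ≤ t ∧ t < 60000 by omega), e1, e2, e3, e4]
      exact format_eq _ _ _ _ (ne _) (ne 0) (ne 0)
    · by_cases h3 : t < 3600000
      · -- band 3: h = 0, the 3600000-remainder is t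
        have e1 : PySem.Int.floordiv t 3600000 = 0 := by
          rw [PySem.Int.floordiv_eq_ediv_of_pos (by norm_num)]; omega
        have e2 : PySem.Int.mod t 3600000 = t := by
          rw [PySem.Int.mod_eq_emod_of_pos (by norm_num)]; omega
        simp only [if_neg h1, if_neg (show ¬(1000 ≤ t ∧ t < 60000) by omega),
          if_pos (show 60000 ≤ t ∧ t < 3600000 by omega), e1, e2]
        exact format_eq _ _ _ _ (ne _) (ne _) (ne 0)
      · -- band 4: identical absolute expressions
        simp only [if_neg h1, if_neg (show ¬(1000 ≤ t ∧ t < 60000) by omega),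
          if_neg (show ¬(60000 ≤ t ∧ t < 3600000) by omega),
          if_pos (show 3600000 ≤ t by omega)]
        exact format_eq _ _ _ _ (ne _) (ne _) (ne _)
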